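-- pv_equiv track=rewrite | github.com/lilaspourpre/newsexplorer | pyqt/graphform.py | getSent
-- ===== SOURCE A (Python) =====
-- def getSent(listOfSent):
--     newList = []
--     resList = []
--     for person in listOfSent:
--         for sent in person:
--             newList.append(sent)
--     dictArticles = dict.fromkeys(list(set(newList)), 0)
--     for sent in newList:
--         dictArticles[sent] += 1
--     for key in dictArticles:
--         if dictArticles[key] > 1:
--             resList.append(key)
--     return resList
-- ===== SOURCE B (Python) =====
-- def getSent(listOfSent):
--     flat = [sent for person in listOfSent for sent in person]
--     srt = sorted(flat)
--     dups = {a for a, b in zip(srt, srt[1:]) if a == b}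
--     return [sent for sent in set(flat) if sent in dups]
-- ===== Notes on version B (the rewrite author's own statement) =====
-- stated objective: alternative
-- what changed: Replaces A's dict-based tallying (fromkeys, increment loop, key scan with count > 1) by sorting the flattened list and collecting the values of adjacent equal pairs as the duplicate set, then filtering the distinct elements by membership in that set.
import Mathlib
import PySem

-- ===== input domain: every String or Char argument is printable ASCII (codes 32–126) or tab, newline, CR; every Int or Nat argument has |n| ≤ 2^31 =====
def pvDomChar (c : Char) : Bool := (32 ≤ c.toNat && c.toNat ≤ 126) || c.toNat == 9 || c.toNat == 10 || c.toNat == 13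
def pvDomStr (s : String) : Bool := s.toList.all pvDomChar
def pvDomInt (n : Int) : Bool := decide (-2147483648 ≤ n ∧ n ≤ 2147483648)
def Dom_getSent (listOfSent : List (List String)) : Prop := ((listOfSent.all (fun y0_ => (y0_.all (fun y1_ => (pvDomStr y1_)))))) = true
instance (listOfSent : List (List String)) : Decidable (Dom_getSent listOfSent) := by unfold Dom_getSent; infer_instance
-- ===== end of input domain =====

-- B replaces A's flatten-loop + fromkeys/increment dict + key-scan by sorting the flattened
-- list, collecting values of adjacent equal pairs as the duplicate set, and filtering the
-- distinct elements by membership in it (alternative algorithm, same values).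


-- ===== PORT A =====
def getSent (listOfSent : List (List String)) : List String :=
  let newList : List String :=
    listOfSent.foldl (fun acc person => person.foldl (fun acc sent => acc ++ [sent]) acc) []
  -- dict.fromkeys(list(set(newList)), 0)
  let dictArticles : PySem.Dict String Int :=
    (PySem.Set.ofList newList).foldl (fun d k => d.insert k 0) PySem.Dict.empty
  -- for sent in newList: dictArticles[sent] += 1   (key always present, so '+= 1' = modify with default 0)
  let dictArticles := newList.foldl (fun d sent => d.modify sent 0 (· + 1)) dictArticles
  dictArticles.keys.foldl
    (fun resList key => if dictArticles.getD key 0 > 1 then resList ++ [key] else resList) []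

-- ===== PORT B =====
def getSent_alt (listOfSent : List (List String)) : List String :=
  let flat : List String := listOfSent.flatMap (fun person => person)
  let srt : List String := PySem.List.sorted flat (fun x => x) false
  -- {a for a, b in zip(srt, srt[1:]) if a == b}
  let dups : PySem.Set String :=
    PySem.Set.ofList (((srt.zip (PySem.List.slice srt (some 1) none)).filter
      (fun p => p.1 == p.2)).map Prod.fst)
  (PySem.Set.ofList flat).filter (fun sent => decide (sent ∈ dups))

-- ===== PRECONDITION & SPEC =====
def Spec_getSent (listOfSent : List (List String)) (out : List String) : Prop := out = getSent_alt listOfSent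
instance (listOfSent : List (List String)) (out : List String) : Decidable (Spec_getSent listOfSent out) := by unfold Spec_getSent; infer_instance

-- ===== CLAIM (what is proved, stated in full; the proofs are below) =====
def Claim_equal_getSent : Prop := ∀ (listOfSent : List (List String)), Dom_getSent listOfSent → Spec_getSent listOfSent (getSent listOfSent)

-- ===== LEMMAS AND PROOFS =====

-- the double append loop flattens
theorem pv_flatten (listOfSent : List (List String)) :
    listOfSent.foldl (fun acc person => person.foldl (fun acc sent => acc ++ [sent]) acc) [] =
      listOfSent.flatMap (fun person => person) := by
  have inner : ∀ (person acc : List String),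
      person.foldl (fun acc sent => acc ++ [sent]) acc = acc ++ person := by
    intro person
    induction person with
    | nil => intro acc; simp [List.foldl]
    | cons h t ih => intro acc; simp [List.foldl, ih]
  have gen : ∀ (l : List (List String)) (acc : List String),
      l.foldl (fun acc person => person.foldl (fun acc sent => acc ++ [sent]) acc) acc =
        acc ++ l.flatMap (fun person => person) := by
    intro l
    induction l with
    | nil => intro acc; simp
    | cons h t ih => intro acc; rw [List.foldl_cons, inner, ih]; simp
  simpa using gen listOfSent []

-- dict.fromkeys(set(xs), 0): every lookup with default 0 is 0, keys = set(xs)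
theorem pv_fromkeys_getD (xs : List String) (k : String) :
    ((PySem.Set.ofList xs).foldl (fun d k => d.insert k (0 : Int)) PySem.Dict.empty).getD k 0 = 0 := by
  have gen : ∀ (l : List String) (d : PySem.Dict String Int),
      d.getD k 0 = 0 → (l.foldl (fun d k => d.insert k (0 : Int)) d).getD k 0 = 0 := by
    intro l
    induction l with
    | nil => intro d hd; simpa using hd
    | cons h t ih =>
        intro d hd
        simp only [List.foldl]
        exact ih _ (by rw [PySem.Dict.getD_insert]; split <;> simp [hd])
  exact gen _ _ (by simp)

theorem pv_fromkeys_keys (xs : List String) :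
    ((PySem.Set.ofList xs).foldl (fun d k => d.insert k (0 : Int)) PySem.Dict.empty).keys =
      PySem.Set.ofList xs := by
  rw [PySem.Dict.keys_foldl_insert]
  simp [PySem.Dict.keys_empty, PySem.Set.update_nil_left, PySem.Set.ofList_ofList]

-- keys after the counting loop are unchanged (all counted keys already present)
theorem pv_count_keys (xs : List String) (d : PySem.Dict String Int) (h : ∀ x ∈ xs, x ∈ d.keys) :
    (xs.foldl (fun d sent => d.modify sent 0 (· + 1)) d).keys = d.keys := by
  rw [PySem.Dict.keys_foldl_modify]
  have gen : ∀ (t : List String) (s : PySem.Set String), (∀ x ∈ t, x ∈ s) → PySem.Set.update s t = s := by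
    intro t
    induction t with
    | nil => intro s _; rfl
    | cons a tl ih =>
        intro s hmem
        rw [PySem.Set.update_cons, PySem.Set.add_of_mem (hmem a (by simp))]
        exact ih s (fun x hx => hmem x (by simp [hx]))
  exact gen xs d.keys h

-- in a ≤-sorted list, x is the first component of an adjacent equal pair iff it occurs at least twice
theorem pv_adj_mem_iff (l : List String) (hp : l.Pairwise (· ≤ ·)) (x : String) :
    x ∈ ((l.zip l.tail).filter (fun p => p.1 == p.2)).map Prod.fst ↔ 2 ≤ l.count x := by
  induction l with
  | nil => simp
  | cons a t ih =>
      cases t with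
      | nil =>
          simp only [List.tail_cons, List.zip_nil_right, List.filter_nil, List.map_nil,
            List.not_mem_nil, false_iff]
          by_cases hxa : x = a
          · subst hxa; simp
          · simp [Ne.symm hxa]
      | cons b t' =>
          have hab : a ≤ b := (List.pairwise_cons.1 hp).1 b (by simp)
          have hp' : (b :: t').Pairwise (· ≤ ·) := (List.pairwise_cons.1 hp).2
          have ih' := ih hp'
          simp only [List.tail_cons] at ih' ⊢
          rw [List.zip_cons_cons, List.filter_cons]
          by_cases heq : a = b
          · subst heq
            rw [if_pos (by simp)]
            simp only [List.map_cons, List.mem_cons]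
            by_cases hxa : x = a
            · subst hxa
              constructor
              · intro _; simp
              · intro _; left; rfl
            · simp only [hxa, false_or]
              rw [ih']
              simp [Ne.symm hxa]
          · rw [if_neg (by simp [heq])]
            rw [ih']
            by_cases hxa : x = a
            · subst hxa
              have hnot : x ∉ (b :: t') := by
                intro hmem
                rcases List.mem_cons.1 hmem with h | h
                · exact heq h
                · have hby : b ≤ x := (List.pairwise_cons.1 hp').1 x h
                  exact heq (le_antisymm hab hby)
              have h0 : (b :: t').count x = 0 := List.count_eq_zero.2 hnot
              rw [h0, List.count_cons_self, h0]
              simp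
            · simp [Ne.symm hxa]

-- ===== VERDICT (by name: the statement is the Claim_ definition above) =====
theorem getSent_spec : Claim_equal_getSent := by
  intro listOfSent _
  show getSent listOfSent = getSent_alt listOfSent
  unfold getSent getSent_alt
  simp only [pv_flatten]
  set flat := listOfSent.flatMap (fun person => person) with hflat
  set d0 := (PySem.Set.ofList flat).foldl (fun d k => d.insert k (0 : Int)) PySem.Dict.empty with hd0
  set d1 := flat.foldl (fun d sent => d.modify sent 0 (· + 1)) d0 with hd1
  have hgetD : ∀ k, d1.getD k 0 = (flat.count k : Int) := by
    intro k
    rw [hd1, PySem.Dict.getD_foldl_modify_add_one, pv_fromkeys_getD]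
    ring
  have hkeys : d1.keys = PySem.Set.ofList flat := by
    rw [hd1, pv_count_keys, pv_fromkeys_keys]
    intro x hx
    rw [pv_fromkeys_keys]
    exact (PySem.Set.mem_ofList _ _).2 hx
  rw [hkeys]
  rw [PySem.List.foldl_append_ite_eq_filter]
  set srt := PySem.List.sorted flat (fun x => x) false with hsrt
  have htail : PySem.List.slice srt (some 1) none = srt.tail := PySem.List.slice_from_one srt
  rw [htail]
  apply List.filter_congr
  intro x _
  have hcount : srt.count x = flat.count x :=
    (PySem.List.sorted_perm flat (fun x => x) false).count_eq x
  have hmem : x ∈ PySem.Set.ofList (((srt.zip srt.tail).filter (fun p => p.1 == p.2)).map Prod.fst)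
      ↔ 2 ≤ flat.count x := by
    rw [PySem.Set.mem_ofList, pv_adj_mem_iff srt (PySem.List.sorted_pairwise flat (fun x => x)) x,
      hcount]
  simp only [hgetD x, decide_eq_decide, hmem]
  omega
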